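-- pv_equiv track=rewrite | github.com/Siva-PythonPirates/java_summer_camp | strong.py | func
-- ===== SOURCE A (Python) =====
-- def func(arr, N):
-- 	if(N == 1):
-- 		return 1
-- 	counter = 0
-- 	for i in range(N):
-- 		gcd = 0
-- 		for j in range(N):
-- 			if(i == j):
-- 				continue
-- 			else:
-- 				gcd = GCD(gcd, arr[j])
-- 		if(gcd > 1):
-- 			counter += 1
-- 	return counter
--
-- def GCD(a, b):
-- 	if(b == 0):
-- 		return a
-- 	else:
-- 		return GCD(b, a % b)
-- ===== SOURCE B (Python) =====
-- def func(arr, N):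
--     if N == 1:
--         return 1
--     if N <= 0:
--         return 0
--     xs = arr[:N]
--     sufs = [0]
--     for x in reversed(xs):
--         sufs.append(GCD(x, sufs[-1]))
--     sufs.reverse()
--     count = 0
--     pref = 0
--     for x, s in zip(xs, sufs[1:]):
--         if GCD(pref, s) > 1:
--             count += 1
--         pref = GCD(pref, x)
--     return count
--
-- def GCD(a, b):
--     while b != 0:
--         a, b = b, a % b
--     return a
-- ===== Notes on version B (the rewrite author's own statement) =====
-- stated objective: faster
-- what changed: Replaces the quadratic double loop (recomputing the leave-one-out GCD from scratch for every index) by one suffix-GCD scan plus one forward scan that threads a prefix GCD, so each index costs O(1) extra GCD work.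
import Mathlib
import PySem

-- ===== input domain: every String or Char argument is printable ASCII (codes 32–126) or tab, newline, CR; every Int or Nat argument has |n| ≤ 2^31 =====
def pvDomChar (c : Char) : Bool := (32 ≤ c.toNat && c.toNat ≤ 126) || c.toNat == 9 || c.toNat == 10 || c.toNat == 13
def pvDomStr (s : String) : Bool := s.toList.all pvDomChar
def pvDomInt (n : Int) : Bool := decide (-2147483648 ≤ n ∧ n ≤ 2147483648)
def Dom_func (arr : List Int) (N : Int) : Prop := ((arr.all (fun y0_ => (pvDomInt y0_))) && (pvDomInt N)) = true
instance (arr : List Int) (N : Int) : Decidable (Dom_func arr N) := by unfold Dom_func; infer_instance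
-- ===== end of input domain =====

-- B is an O(N log M) prefix/suffix-GCD re-implementation of A's O(N^2 log M) double loop; equal return values proved on Pre_.

-- Python's `%` has the divisor's sign, so the remainder shrinks in absolute value (termination of GCD).
theorem pyMod_natAbs_lt (a b : Int) (hb : b ≠ 0) :
    (PySem.Int.mod a b).natAbs < b.natAbs := by
  rcases lt_or_gt_of_ne hb with h | h
  · have := PySem.Int.mod_neg_bounds a h; omega
  · have h1 := PySem.Int.mod_nonneg a h
    have h2 := PySem.Int.mod_lt a h
    omega

-- shared helper: both Pythons carry the same Euclidean GCD helper (A recursive, B as the equivalent while loop)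
def pyGCD (a b : Int) : Int :=
  if h : b = 0 then a else pyGCD b (PySem.Int.mod a b)
termination_by b.natAbs
decreasing_by exact pyMod_natAbs_lt a b h

-- ===== PORT A =====
def func (arr : List Int) (N : Int) : Int :=
  if N = 1 then 1
  else
    (PySem.List.pyRange 0 N 1).foldl
      (fun counter i =>
        let g := (PySem.List.pyRange 0 N 1).foldl
          (fun g j => if i = j then g else pyGCD g (PySem.List.pyGetD arr j 0)) 0
        if g > 1 then counter + 1 else counter) 0

-- ===== PORT B =====
def func_alt (arr : List Int) (N : Int) : Int :=
  if N = 1 then 1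
  else if N ≤ 0 then 0
  else
    let xs := PySem.List.slice arr none (some N)
    -- suffix-GCD list (python appends then reverses; prepending builds the same final list)
    let sufs := xs.reverse.foldl (fun sufs x => pyGCD x (sufs.headD 0) :: sufs) [0]
    ((xs.zip sufs.tail).foldl
      (fun cp p => (if pyGCD cp.2 p.2 > 1 then cp.1 + 1 else cp.1, pyGCD cp.2 p.1))
      ((0 : Int), (0 : Int))).1

-- ===== PRECONDITION & SPEC =====
-- Pre_ excludes exactly the inputs where A raises IndexError: N ≥ 2 with N > len(arr) (arr[j] is read for all j < N).
def Pre_func (arr : List Int) (N : Int) : Prop := N ≤ 1 ∨ N ≤ (arr.length : Int)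
instance (arr : List Int) (N : Int) : Decidable (Pre_func arr N) := by unfold Pre_func; infer_instance
def pvWitness_func : List Int × Int := ([2, 4, 6], 3)

def Spec_func (arr : List Int) (N : Int) (out : Int) : Prop := out = func_alt arr N
instance (arr : List Int) (N : Int) (out : Int) : Decidable (Spec_func arr N out) := by unfold Spec_func; infer_instance

-- ===== CLAIM (what is proved, stated in full; the proofs are below) =====
def Claim_equal_func : Prop := ∀ (arr : List Int) (N : Int), Dom_func arr N → Pre_func arr N → Spec_func arr N (func arr N)

-- ===== LEMMAS AND PROOFS =====

theorem pyGCD_char (a b : Int) : pyGCD a b = if b = 0 then a else b.sign * Int.gcd a b := by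
  induction a, b using pyGCD.induct with
  | case1 a => simp [pyGCD]
  | case2 a b hb ih =>
    rw [pyGCD]
    simp only [hb, dif_neg, if_neg, not_false_iff]
    rw [ih]
    by_cases hr : PySem.Int.mod a b = 0
    · have hdvd : b ∣ a := (PySem.Int.mod_eq_zero_iff_dvd a b).mp hr
      rw [if_pos hr, Int.gcd_eq_natAbs_right_iff_dvd.mpr hdvd, Int.sign_mul_natAbs]
    · rw [if_neg hr]
      have hsign : (PySem.Int.mod a b).sign = b.sign := by
        rcases lt_or_gt_of_ne hb with h | h
        · have := PySem.Int.mod_neg_bounds a h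
          have h1 : PySem.Int.mod a b < 0 := by omega
          rw [Int.sign_eq_neg_one_of_neg h1, Int.sign_eq_neg_one_of_neg h]
        · have h1 := PySem.Int.mod_nonneg a h
          have h2 : 0 < PySem.Int.mod a b := by omega
          rw [Int.sign_eq_one_of_pos h2, Int.sign_eq_one_of_pos h]
      have hmod : PySem.Int.mod a b = a - PySem.Int.floordiv a b * b := by
        have := PySem.Int.floordiv_mul_add_mod a b; omega
      have hgcd : Int.gcd b (PySem.Int.mod a b) = Int.gcd a b := by
        rw [hmod, Int.gcd_sub_mul_right_right, Int.gcd_comm]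
      rw [hsign, hgcd]

theorem pyGCD_zero_right (a : Int) : pyGCD a 0 = a := by simp [pyGCD]

theorem pyGCD_zero_left (y : Int) : pyGCD 0 y = y := by
  rw [pyGCD_char]
  split_ifs with h
  · omega
  · rw [Int.gcd_zero_left, Int.sign_mul_natAbs]

theorem natAbs_pyGCD (s y : Int) (hy : y ≠ 0) : (pyGCD s y).natAbs = Int.gcd s y := by
  rw [pyGCD_char, if_neg hy, Int.natAbs_mul, Int.natAbs_natCast]
  simp [Int.natAbs_sign, hy]

theorem sign_sign_mul_gcd (t : Int) (g : Nat) (hg : g ≠ 0) : (t.sign * (g : Int)).sign = t.sign := by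
  rcases lt_trichotomy t 0 with h | h | h
  · rw [Int.sign_eq_neg_one_of_neg h]
    have : (0:Int) < g := by exact_mod_cast Nat.pos_of_ne_zero hg
    rw [Int.sign_eq_neg_one_of_neg (by omega)]
  · subst h; simp
  · rw [Int.sign_eq_one_of_pos h]
    have : (0:Int) < g := by exact_mod_cast Nat.pos_of_ne_zero hg
    rw [Int.sign_eq_one_of_pos (by omega)]

theorem pyGCD_assoc (s y t : Int) : pyGCD (pyGCD s y) t = pyGCD s (pyGCD y t) := by
  by_cases ht : t = 0
  · rw [ht, pyGCD_zero_right, pyGCD_zero_right]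
  by_cases hy : y = 0
  · rw [hy, pyGCD_zero_right, pyGCD_zero_left]
  -- RHS inner value and its facts
  have hyt : pyGCD y t ≠ 0 := by
    rw [pyGCD_char, if_neg ht]
    have hg : Int.gcd y t ≠ 0 := by
      rw [Ne, Int.gcd_eq_zero_iff]; tauto
    rcases lt_trichotomy t 0 with h | h | h
    · rw [Int.sign_eq_neg_one_of_neg h]
      have : (0:Int) < (Int.gcd y t : Int) := by exact_mod_cast Nat.pos_of_ne_zero hg
      omega
    · omega
    · rw [Int.sign_eq_one_of_pos h]
      have : (0:Int) < (Int.gcd y t : Int) := by exact_mod_cast Nat.pos_of_ne_zero hg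
      omega
  have hgyt : Int.gcd y t ≠ 0 := by rw [Ne, Int.gcd_eq_zero_iff]; tauto
  rw [pyGCD_char (pyGCD s y) t, if_neg ht, pyGCD_char s (pyGCD y t), if_neg hyt]
  -- signs agree
  have hs1 : (pyGCD y t).sign = t.sign := by
    rw [pyGCD_char, if_neg ht]; exact sign_sign_mul_gcd t _ hgyt
  rw [hs1]
  -- magnitudes agree via Nat.gcd_assoc
  congr 1
  have h1 : Int.gcd (pyGCD s y) t = Nat.gcd (pyGCD s y).natAbs t.natAbs := rfl
  have h2 : Int.gcd s (pyGCD y t) = Nat.gcd s.natAbs (pyGCD y t).natAbs := rfl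
  rw [h1, h2, natAbs_pyGCD s y hy, natAbs_pyGCD y t ht]
  have : Int.gcd s y = Nat.gcd s.natAbs y.natAbs := rfl
  rw [this]
  have : Int.gcd y t = Nat.gcd y.natAbs t.natAbs := rfl
  rw [this]
  exact_mod_cast Nat.gcd_assoc s.natAbs y.natAbs t.natAbs

theorem foldl_pyGCD_start (ys : List Int) : ∀ s : Int, ys.foldl pyGCD s = pyGCD s (ys.foldl pyGCD 0) := by
  induction ys with
  | nil => intro s; simp [pyGCD_zero_right]
  | cons y ys ih =>
    intro s
    simp only [List.foldl_cons]
    rw [ih (pyGCD s y), ih (pyGCD 0 y), pyGCD_zero_left, pyGCD_assoc]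

-- the common combinatorial core: leave-one-out count with a threaded prefix GCD
def aCount (pref : Int) : List Int → Int
  | [] => 0
  | x :: t => (if pyGCD pref (t.foldl pyGCD 0) > 1 then 1 else 0) + aCount (pyGCD pref x) t

-- ===== A-side reduction =====

theorem inner_eq (arr : List Int) (i : Int) :
    ∀ (n : Nat), n ≤ arr.length → ∀ g : Int,
    (List.range n).foldl (fun (g : Int) (k : Nat) => if i = (k : Int) then g else pyGCD g (PySem.List.pyGetD arr (k : Int) 0)) g
      = if 0 ≤ i ∧ i < (n : Int) then ((arr.take n).eraseIdx i.toNat).foldl pyGCD g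
        else (arr.take n).foldl pyGCD g := by
  intro n
  induction n with
  | zero =>
    intro _ g
    simp only [List.range_zero, List.foldl_nil, List.take_zero, List.eraseIdx_nil]
    split <;> simp
  | succ n ih =>
    intro hlen g
    have hn : n < arr.length := by omega
    rw [List.range_succ, List.foldl_append, List.foldl_cons, List.foldl_nil,
      ih (by omega) g]
    rw [PySem.List.pyGetD_natCast, List.getD_eq_getElem _ _ hn]
    rw [List.take_succ_eq_append_getElem hn]
    by_cases hi : i = (n : Int)
    · have hcond : ¬ (0 ≤ i ∧ i < (n : Int)) := by omega
      rw [if_pos hi, if_neg hcond, if_pos (by omega)]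
      have hitn : i.toNat = n := by omega
      have hlt : (arr.take n).length ≤ i.toNat := by rw [List.length_take_of_le (by omega)]; omega
      rw [List.eraseIdx_append_of_length_le hlt, hitn, List.length_take_of_le (by omega)]
      simp
    · rw [if_neg hi]
      by_cases h0 : 0 ≤ i ∧ i < (n : Int)
      · rw [if_pos h0, if_pos (by omega)]
        have hlt : i.toNat < (arr.take n).length := by rw [List.length_take_of_le (by omega)]; omega
        rw [List.eraseIdx_append_of_lt_length hlt, List.foldl_append, List.foldl_cons, List.foldl_nil]
      · rw [if_neg h0, if_neg (by omega), List.foldl_append, List.foldl_cons, List.foldl_nil]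

theorem range_count_erase (xs : List Int) :
    ∀ (pref c : Int),
    (List.range xs.length).foldl
        (fun c k => if ((xs.eraseIdx k).foldl pyGCD pref) > 1 then c + 1 else c) c
      = c + aCount pref xs := by
  induction xs with
  | nil => intro pref c; simp [aCount]
  | cons x t ih =>
    intro pref c
    rw [List.length_cons, List.range_succ_eq_map, List.foldl_cons, List.foldl_map]
    simp only [List.eraseIdx_cons_zero, List.eraseIdx_cons_succ, List.foldl_cons]
    have H := ih (pyGCD pref x) (if List.foldl pyGCD pref t > 1 then c + 1 else c)
    refine H.trans ?_
    rw [foldl_pyGCD_start t pref, aCount]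
    by_cases h : pyGCD pref (t.foldl pyGCD 0) > 1
    · rw [if_pos h, if_pos h]; ring
    · rw [if_neg h, if_neg h]; ring

-- ===== B-side reduction =====

def sufF (t : List Int) : List Int := t.foldr (fun x acc => pyGCD x (acc.headD 0) :: acc) [0]

theorem sufs_eq (xs : List Int) :
    xs.reverse.foldl (fun sufs x => pyGCD x (sufs.headD 0) :: sufs) [0] = sufF xs := by
  rw [List.foldl_reverse]; rfl

theorem sufF_ne_nil (t : List Int) : sufF t ≠ [] := by cases t <;> simp [sufF]

theorem sufF_head (t : List Int) : (sufF t).headD 0 = t.foldl pyGCD 0 := by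
  induction t with
  | nil => rfl
  | cons x t ih =>
    show pyGCD x ((sufF t).headD 0) = (x :: t).foldl pyGCD 0
    rw [ih, List.foldl_cons, pyGCD_zero_left, foldl_pyGCD_start t x]

theorem bloop (xs : List Int) :
    ∀ (c pref : Int),
    ((xs.zip ((sufF xs).tail)).foldl
        (fun cp p => (if pyGCD cp.2 p.2 > 1 then cp.1 + 1 else cp.1, pyGCD cp.2 p.1))
        (c, pref)).1
      = c + aCount pref xs := by
  induction xs with
  | nil => intro c pref; simp [aCount]
  | cons x t ih =>
    intro c pref
    have hcons : sufF (x :: t) = pyGCD x ((sufF t).headD 0) :: sufF t := rfl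
    rw [hcons]
    cases hst : sufF t with
    | nil => exact absurd hst (sufF_ne_nil t)
    | cons s rest =>
      have hs : s = t.foldl pyGCD 0 := by
        have := sufF_head t; rw [hst] at this; simpa using this
      have htail : rest = (sufF t).tail := by rw [hst, List.tail_cons]
      simp only [List.tail_cons, List.zip_cons_cons, List.foldl_cons]
      rw [htail, ih]
      rw [aCount, hs]
      by_cases h : pyGCD pref (t.foldl pyGCD 0) > 1
      · rw [if_pos h, if_pos h]; ring
      · rw [if_neg h, if_neg h]; ring

-- ===== main =====

theorem func_eq_aCount (arr : List Int) (N : Int) (h2 : 2 ≤ N) (hlen : N ≤ (arr.length : Int)) :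
    func arr N = aCount 0 (arr.take N.toNat) := by
  have hN1 : N ≠ 1 := by omega
  rw [func, if_neg hN1]
  rw [PySem.List.pyRange_zero, List.foldl_map]
  set n := N.toNat with hn
  have hnl : n ≤ arr.length := by omega
  rw [PySem.List.foldl_congr_mem _ _
    (fun c k => if ((arr.take n).eraseIdx k).foldl pyGCD 0 > 1 then c + 1 else c) 0 ?_]
  · have hlen' : (arr.take n).length = n := List.length_take_of_le hnl
    calc (List.range n).foldl
          (fun c k => if ((arr.take n).eraseIdx k).foldl pyGCD 0 > 1 then c + 1 else c) 0
        = (List.range (arr.take n).length).foldl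
          (fun c k => if ((arr.take n).eraseIdx k).foldl pyGCD 0 > 1 then c + 1 else c) 0 := by rw [hlen']
      _ = 0 + aCount 0 (arr.take n) := range_count_erase (arr.take n) 0 0
      _ = aCount 0 (arr.take n) := by ring
  · intro acc k hk
    have hk' : k < n := List.mem_range.mp hk
    simp only [List.foldl_map]
    have hcond : 0 ≤ (k : Int) ∧ (k : Int) < (n : Int) := ⟨by omega, by omega⟩
    rw [inner_eq arr (k : Int) n hnl 0, if_pos hcond]
    simp

theorem func_alt_eq_aCount (arr : List Int) (N : Int) (h2 : 2 ≤ N) :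
    func_alt arr N = aCount 0 (arr.take N.toNat) := by
  have hN1 : N ≠ 1 := by omega
  have hN0 : ¬ N ≤ 0 := by omega
  rw [func_alt, if_neg hN1, if_neg hN0]
  simp only
  rw [PySem.List.slice_to arr (by omega), sufs_eq, bloop]
  ring

-- ===== VERDICT (by name: the statement is the Claim_ definition above) =====
theorem func_spec : Claim_equal_func := by
  intro arr N _ hPre
  unfold Spec_func
  by_cases hN1 : N = 1
  · rw [func, func_alt, if_pos hN1, if_pos hN1]
  by_cases hN0 : N ≤ 0
  · rw [func, func_alt, if_neg hN1, if_neg hN1, if_pos hN0,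
      PySem.List.pyRange_one_eq_nil hN0, List.foldl_nil]
  · have h2 : 2 ≤ N := by omega
    have hlen : N ≤ (arr.length : Int) := by
      rcases hPre with h | h
      · omega
      · exact h
    rw [func_eq_aCount arr N h2 hlen, func_alt_eq_aCount arr N h2]
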